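-- pv_equiv track=rewrite | github.com/MrHamdulay/csc3-capstone | examples/data/Assignment_8/bxsmuh001/question2.py | charPair
-- ===== SOURCE A (Python) =====
-- def charPair(word,count=0): #Initialize counter to 0.
--   if(len(word)>=2): #As long as length is greater than 2 or equal 2
--     if(len(word)>2): #If message is greater than 2.
--       if(word[0] == word[1] and word[1]==word[2]):
--         return charPair(word[2:],count+1) #If first character equals second character add 1 to counter.
--       elif(word[0] == word[1] and word[1] != word[2]):
--         return charPair(word[1:],count+1)
--       else:
--         return charPair(word[1:],count+0)
--     #If Message is exactly of length 2.
--     elif(len(word) == 2):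
--       if(word[0] == word[1]):
--         return charPair(word[2:],count+1)
--       else:
--         return charPair(word[1:],count+0)
--   else: #If word has less than 2 characters.
--       return count #Return total count(i.e. pair of characters)
-- ===== SOURCE B (Python) =====
-- def charPair(word, count=0):
--     total = count
--     run = 0
--     prev = None
--     for ch in word:
--         if ch == prev:
--             run += 1
--         else:
--             total += run // 2
--             run = 1
--             prev = ch
--     return total + run // 2
-- ===== Notes on version B (the rewrite author's own statement) =====
-- stated objective: faster
-- what changed: Replaces A's three-way advance-by-1-or-2 recursive slicing with a single iterative pass that tracks the current run of equal characters and sums floor(runLength/2) over maximal runs.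
import Mathlib
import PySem

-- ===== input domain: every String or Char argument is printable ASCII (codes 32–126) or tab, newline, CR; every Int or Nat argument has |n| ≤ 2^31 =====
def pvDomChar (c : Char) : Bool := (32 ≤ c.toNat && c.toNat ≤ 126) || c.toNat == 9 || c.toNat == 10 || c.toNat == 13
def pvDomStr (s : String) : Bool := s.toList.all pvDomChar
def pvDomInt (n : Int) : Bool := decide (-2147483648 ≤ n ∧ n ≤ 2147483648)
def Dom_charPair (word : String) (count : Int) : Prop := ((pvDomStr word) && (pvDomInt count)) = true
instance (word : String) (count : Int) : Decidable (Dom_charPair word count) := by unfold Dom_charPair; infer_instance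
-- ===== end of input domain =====

-- B replaces A's advance-by-1-or-2 recursion by a single left-to-right pass summing floor(runLength/2) over maximal runs (objective: simpler).

-- ===== PORT A =====
-- A's recursion, transliterated on the character list (word[i] indexing, word[1:]/word[2:] slicing become list pattern/tails).
def charPairGo : List Char → Int → Int
  | c0 :: c1 :: c2 :: rest, count =>
      if c0 = c1 ∧ c1 = c2 then charPairGo (c2 :: rest) (count + 1)
      else if c0 = c1 ∧ c1 ≠ c2 then charPairGo (c1 :: c2 :: rest) (count + 1)
      else charPairGo (c1 :: c2 :: rest) count
  | [c0, c1], count => if c0 = c1 then charPairGo [] (count + 1) else charPairGo [c1] count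
  | _, count => count
  termination_by l _ => l.length

def charPair (word : String) (count : Int) : Int := charPairGo word.toList count

-- ===== PORT B =====
-- one step of B's loop: state is (total, run, prev)
def charPairStep (st : Int × Int × Option Char) (ch : Char) : Int × Int × Option Char :=
  if some ch = st.2.2 then (st.1, st.2.1 + 1, st.2.2)
  else (st.1 + PySem.Int.floordiv st.2.1 2, 1, some ch)

def charPair_alt (word : String) (count : Int) : Int :=
  let st := word.toList.foldl charPairStep (count, 0, none)
  st.1 + PySem.Int.floordiv st.2.1 2

-- ===== PRECONDITION & SPEC =====
def Spec_charPair (word : String) (count : Int) (out : Int) : Prop := out = charPair_alt word count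
instance (word : String) (count : Int) (out : Int) : Decidable (Spec_charPair word count out) := by unfold Spec_charPair; infer_instance

-- ===== CLAIM (what is proved, stated in full; the proofs are below) =====
def Claim_equal_charPair : Prop := ∀ (word : String) (count : Int), Dom_charPair word count → Spec_charPair word count (charPair word count)

-- ===== LEMMAS AND PROOFS =====

-- greedy non-overlapping adjacent-pair count, the common characterisation of both programs
def gp : List Char → Int
  | a :: b :: rest => if a = b then 1 + gp rest else gp (b :: rest)
  | _ => 0
  termination_by l => l.length

theorem gp_nil : gp [] = 0 := by rw [gp.eq_def]

theorem gp_one (a : Char) : gp [a] = 0 := by rw [gp.eq_def]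

theorem gp_cons2 (a b : Char) (l : List Char) :
    gp (a :: b :: l) = if a = b then 1 + gp l else gp (b :: l) := by rw [gp]

theorem cpg_nil (count : Int) : charPairGo [] count = count := by rw [charPairGo.eq_def]

theorem cpg_one (a : Char) (count : Int) : charPairGo [a] count = count := by
  rw [charPairGo.eq_def]

theorem charPairGo_eq_gp (l : List Char) (count : Int) : charPairGo l count = count + gp l := by
  fun_induction charPairGo l count with
  | case1 c0 c1 c2 rest count h ih =>
      rw [ih, gp_cons2 c0 c1 (c2 :: rest), if_pos h.1]
      ring
  | case2 c0 c1 c2 rest count h1 h2 ih =>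
      rw [ih, gp_cons2 c0 c1 (c2 :: rest), if_pos h2.1, gp_cons2 c1 c2 rest, if_neg h2.2]
      ring
  | case3 c0 c1 c2 rest count h1 h2 ih =>
      have hne : c0 ≠ c1 := by tauto
      rw [ih, gp_cons2 c0 c1 (c2 :: rest), if_neg hne]
  | case4 c1 count ih =>
      rw [cpg_nil, gp_cons2, if_pos rfl, gp_nil]
      ring
  | case5 c0 c1 count h ih =>
      rw [cpg_one, gp_cons2, if_neg h, gp_one]
      ring
  | case6 l count h1 h2 =>
      cases l with
      | nil => rw [gp_nil]; ring
      | cons a t =>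
        cases t with
        | nil => rw [gp_one]; ring
        | cons b t2 =>
          cases t2 with
          | nil => exact (h2 a b rfl).elim
          | cons c t3 => exact (h1 a b c t3 rfl).elim

theorem gp_replicate (n : Nat) (p : Char) : gp (List.replicate n p) = (n / 2 : Nat) := by
  induction n using Nat.strong_induction_on with
  | _ n ih =>
    match n with
    | 0 => simp [gp_nil]
    | 1 => simp [gp_one]
    | (m + 2) =>
      rw [List.replicate, List.replicate, gp_cons2, if_pos rfl, ih m (by omega)]
      push_cast
      omega

theorem gp_replicate_append (n : Nat) (p : Char) (l : List Char)
    (h : ∀ b, l.head? = some b → b ≠ p) :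
    gp (List.replicate n p ++ l) = (n / 2 : Nat) + gp l := by
  induction n using Nat.strong_induction_on with
  | _ n ih =>
    match n with
    | 0 => simp
    | 1 =>
      rw [show List.replicate 1 p ++ l = p :: l from rfl]
      match l with
      | [] => rw [gp_one, gp_nil]; simp
      | b :: rest =>
        have hb : b ≠ p := h b rfl
        rw [gp_cons2, if_neg (fun hpb => hb hpb.symm)]
        simp
    | (m + 2) =>
      rw [List.replicate, List.replicate, List.cons_append, List.cons_append,
        gp_cons2, if_pos rfl, ih m (by omega)]
      rw [show ((m + 2) / 2 : Nat) = m / 2 + 1 from by omega]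
      push_cast
      ring

theorem floordiv_toNat (run : Int) (hrun : 0 ≤ run) :
    PySem.Int.floordiv run 2 = ((run.toNat / 2 : Nat) : Int) := by
  rw [PySem.Int.floordiv_eq_ediv_of_pos (by omega)]
  omega

theorem foldl_step_inv (l : List Char) (total run : Int) (p : Char) (hrun : 0 ≤ run) :
    (let st := l.foldl charPairStep (total, run, some p)
     st.1 + PySem.Int.floordiv st.2.1 2) = total + gp (List.replicate run.toNat p ++ l) := by
  induction l generalizing total run p with
  | nil =>
      simp only [List.foldl_nil, List.append_nil, gp_replicate]
      rw [floordiv_toNat run hrun]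
  | cons ch l ih =>
      simp only [List.foldl_cons]
      by_cases hc : ch = p
      · rw [show charPairStep (total, run, some p) ch = (total, run + 1, some p) from by
          simp [charPairStep, hc]]
        rw [ih total (run + 1) p (by omega)]
        have heq : List.replicate (run + 1).toNat p ++ l = List.replicate run.toNat p ++ ch :: l := by
          rw [show (run + 1).toNat = run.toNat + 1 from by omega, List.replicate_succ',
            List.append_assoc, hc]
          rfl
        rw [heq]
      · rw [show charPairStep (total, run, some p) ch
            = (total + PySem.Int.floordiv run 2, 1, some ch) from by
          simp [charPairStep, hc]]
        rw [ih (total + PySem.Int.floordiv run 2) 1 ch (by omega)]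
        rw [gp_replicate_append run.toNat p (ch :: l)
          (by intro b hb; simp only [List.head?_cons, Option.some.injEq] at hb; subst hb; exact hc)]
        rw [show List.replicate ((1 : Int)).toNat ch ++ l = ch :: l from rfl]
        rw [floordiv_toNat run hrun]
        ring

theorem alt_eq_gp (word : String) (count : Int) :
    charPair_alt word count = count + gp word.toList := by
  unfold charPair_alt
  match h : word.toList with
  | [] =>
      rw [gp_nil]
      simp [PySem.Int.floordiv]
  | ch :: l =>
      simp only [List.foldl_cons]
      rw [show charPairStep (count, 0, none) ch
          = (count + PySem.Int.floordiv 0 2, 1, some ch) from by simp [charPairStep]]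
      rw [foldl_step_inv l (count + PySem.Int.floordiv 0 2) 1 ch (by omega)]
      rw [show List.replicate ((1 : Int)).toNat ch ++ l = ch :: l from rfl]
      rw [show PySem.Int.floordiv 0 2 = 0 from by decide]
      ring

-- ===== VERDICT (by name: the statement is the Claim_ definition above) =====
theorem charPair_spec : Claim_equal_charPair := by
  intro word count _
  unfold Spec_charPair
  rw [alt_eq_gp, charPair, charPairGo_eq_gp]
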